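-- pv_equiv track=rewrite | github.com/abingham/npd-to-csv | npd.py | header_fields
-- ===== SOURCE A (Python) =====
-- def header_fields(line):
--     start = 0
--     prev_space = False
--     for idx in range(len(line)):
--         if line[idx] != ' ':
--             if prev_space:
--                 yield line[start:idx]
--                 start = idx
--             prev_space = False
--         else:
--             prev_space = True
-- ===== SOURCE B (Python) =====
-- def header_fields(line):
--     # Pass 1: collect word-start boundary indices.
--     bounds = [0] + [i for i in range(1, len(line))
--                     if line[i] != ' ' and line[i - 1] == ' ']
--     # Pass 2: slice between consecutive boundaries (final field dropped, as in A).
--     for a, b in zip(bounds, bounds[1:]):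
--         yield line[a:b]
-- ===== Notes on version B (the rewrite author's own statement) =====
-- stated objective: alternative
-- what changed: Replaces A's single stateful transition scan (start/prev_space flags mutated per character) by a two-pass shape: first build the list of word-start boundary indices, then slice the line between consecutive boundary pairs.
import Mathlib
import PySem

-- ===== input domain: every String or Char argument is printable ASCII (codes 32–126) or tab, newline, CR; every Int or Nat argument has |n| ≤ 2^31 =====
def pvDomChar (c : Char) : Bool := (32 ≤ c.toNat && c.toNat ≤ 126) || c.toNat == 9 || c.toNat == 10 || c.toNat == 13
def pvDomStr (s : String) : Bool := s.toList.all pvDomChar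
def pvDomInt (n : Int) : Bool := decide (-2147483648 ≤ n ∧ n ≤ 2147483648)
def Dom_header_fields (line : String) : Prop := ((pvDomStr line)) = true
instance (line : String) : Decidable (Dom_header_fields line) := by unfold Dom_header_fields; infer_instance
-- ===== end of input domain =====

-- B replaces A's one-pass transition scan by building the word-start boundary index list first,
-- then slicing between consecutive boundaries (same decomposition objective, same O(n) cost).
-- Python A is a generator; both ports return the list of yielded values.

-- ===== PORT A =====
-- A: one stateful scan with (start, prev_space) over range(len(line)); yields line[start:idx]
-- at each space→non-space transition (the final field is never yielded).
def header_fields (line : String) : List String :=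
  let cs := line.toList
  ((PySem.List.pyRange 0 (PySem.Str.len line) 1).foldl
    (fun (s : Int × Bool × List String) idx =>
      if PySem.List.pyGetD cs idx ' ' ≠ ' ' then
        if s.2.1 then (idx, false, s.2.2 ++ [PySem.Str.slice line (some s.1) (some idx)])
        else (s.1, false, s.2.2)
      else (s.1, true, s.2.2))
    (0, false, [])).2.2

-- ===== PORT B =====
-- B: pass 1 collects boundary indices, pass 2 maps slices over consecutive boundary pairs.
def header_fields_alt (line : String) : List String :=
  let cs := line.toList
  let bounds : List Int :=
    0 :: (PySem.List.pyRange 1 (PySem.Str.len line) 1).filter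
      (fun i => decide (PySem.List.pyGetD cs i ' ' ≠ ' ') &&
                (PySem.List.pyGetD cs (i - 1) ' ' == ' '))
  (bounds.zip (bounds.drop 1)).map (fun ab => PySem.Str.slice line (some ab.1) (some ab.2))

-- ===== PRECONDITION & SPEC =====
def Spec_header_fields (line : String) (out : List String) : Prop := out = header_fields_alt line
instance (line : String) (out : List String) : Decidable (Spec_header_fields line out) := by unfold Spec_header_fields; infer_instance

-- ===== CLAIM (what is proved, stated in full; the proofs are below) =====
def Claim_equal_header_fields : Prop := ∀ (line : String), Dom_header_fields line → Spec_header_fields line (header_fields line)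

-- ===== LEMMAS AND PROOFS =====

-- boundary list of B, cut off at prefix length n (helper for the loop invariant)
def pvBounds (cs : List Char) (n : Nat) : List Int :=
  0 :: (PySem.List.pyRange 1 (n : Int) 1).filter
    (fun i => decide (PySem.List.pyGetD cs i ' ' ≠ ' ') &&
              (PySem.List.pyGetD cs (i - 1) ' ' == ' '))

-- appending one boundary appends one consecutive pair (last old boundary, new one)
lemma pv_zip_consec_append (t : List Int) (y x : Int) :
    ((y :: t) ++ [x]).zip (((y :: t) ++ [x]).drop 1) =
      (y :: t).zip ((y :: t).drop 1) ++ [((y :: t).getLastD 0, x)] := by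
  induction t generalizing y with
  | nil => rfl
  | cons z t ih =>
    have := ih z
    simp only [List.cons_append, List.zip_cons_cons, List.drop_succ_cons, List.drop_zero] at this ⊢
    simp [this, List.getLastD]

lemma pvBounds_succ (cs : List Char) (n : Nat) (h : 1 ≤ n) :
    pvBounds cs (n + 1) =
      pvBounds cs n ++
        (if (decide (PySem.List.pyGetD cs (n : Int) ' ' ≠ ' ') &&
             (PySem.List.pyGetD cs ((n : Int) - 1) ' ' == ' ')) = true
         then [(n : Int)] else []) := by
  unfold pvBounds
  have hc1 : ((n + 1 : Nat) : Int) = (n : Int) + 1 := by push_cast; ring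
  rw [hc1, PySem.List.pyRange_one_succ_right (by exact_mod_cast h), List.filter_append]
  simp only [List.filter_cons, List.filter_nil]
  split_ifs <;> simp_all

-- the loop invariant: after processing indices 0..n-1, A's state is (last boundary,
-- whether cs[n-1] is a space, the slices between consecutive boundaries so far)
lemma pv_inv (line : String) (n : Nat) :
    ((PySem.List.pyRange 0 (n : Int) 1).foldl
      (fun (s : Int × Bool × List String) idx =>
        if PySem.List.pyGetD line.toList idx ' ' ≠ ' ' then
          if s.2.1 then (idx, false, s.2.2 ++ [PySem.Str.slice line (some s.1) (some idx)])
          else (s.1, false, s.2.2)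
        else (s.1, true, s.2.2))
      (0, false, [])) =
    ((pvBounds line.toList n).getLastD 0,
     (decide (n ≠ 0) && (PySem.List.pyGetD line.toList ((n : Int) - 1) ' ' == ' ')),
     ((pvBounds line.toList n).zip ((pvBounds line.toList n).drop 1)).map
       (fun ab => PySem.Str.slice line (some ab.1) (some ab.2))) := by
  induction n with
  | zero =>
    simp [PySem.List.pyRange, pvBounds]
  | succ n ih =>
    have hc1 : ((n + 1 : Nat) : Int) = (n : Int) + 1 := by push_cast; ring
    rw [hc1, PySem.List.pyRange_one_succ_right (by positivity), List.foldl_append, ih]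
    rcases Nat.eq_zero_or_pos n with h0 | h0
    · -- first iteration: no boundary can be added, prev becomes (cs[0] == ' ')
      subst h0
      have hb : pvBounds line.toList 1 = [0] := by
        unfold pvBounds
        rw [show ((1 : Nat) : Int) = 1 by norm_num, PySem.List.pyRange_one_eq_nil le_rfl]
        rfl
      have hb0 : pvBounds line.toList 0 = [0] := by
        unfold pvBounds
        rw [show ((0 : Nat) : Int) = 0 by norm_num, PySem.List.pyRange_one_eq_nil (by norm_num)]
        rfl
      rw [hb, hb0]
      by_cases hc : PySem.List.pyGetD line.toList 0 ' ' = ' '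
      · simp [hc]
      · simp [hc]
    · rw [pvBounds_succ line.toList n h0]
      obtain ⟨y, t, hyt⟩ : ∃ y t, pvBounds line.toList n = y :: t := ⟨0, _, rfl⟩
      have hn0 : (decide (n ≠ 0)) = true := by simp; omega
      by_cases hc : PySem.List.pyGetD line.toList (n : Int) ' ' = ' '
      · -- current char is a space: prev becomes true, nothing yielded, no new boundary
        have hfilt : (decide (PySem.List.pyGetD line.toList (n : Int) ' ' ≠ ' ') &&
            (PySem.List.pyGetD line.toList ((n : Int) - 1) ' ' == ' ')) = false := by
          simp [hc]
        rw [hfilt]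
        simp [List.foldl, hc]
      · by_cases hp : (PySem.List.pyGetD line.toList ((n : Int) - 1) ' ' == ' ') = true
        · -- transition: new boundary n, yield slice (last boundary, n)
          have hfilt : (decide (PySem.List.pyGetD line.toList (n : Int) ' ' ≠ ' ') &&
              (PySem.List.pyGetD line.toList ((n : Int) - 1) ' ' == ' ')) = true := by
            simp only [hp, Bool.and_true, decide_eq_true_eq]
            exact hc
          rw [hfilt]
          simp only [List.foldl, hn0, hp, Bool.and_self, if_pos, ne_eq, hc,
            not_false_eq_true, hyt, pv_zip_consec_append, List.map_append,
            List.map_cons, List.map_nil, add_sub_cancel_right]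
          refine Prod.ext ?_ (Prod.ext ?_ ?_)
          · simp only [List.getLastD_eq_getLast?, ← List.cons_append, List.getLast?_concat,
              Option.getD_some]
          · simp [show ¬line.toList[n]?.getD ' ' = ' ' from by simpa using hc]
          · simp
        · -- no transition: no boundary, nothing yielded
          have hfilt : (decide (PySem.List.pyGetD line.toList (n : Int) ' ' ≠ ' ') &&
              (PySem.List.pyGetD line.toList ((n : Int) - 1) ' ' == ' ')) = false := by
            simp only [Bool.and_eq_false_iff]
            right
            simpa using hp
          rw [hfilt]
          simp only [List.foldl, hn0, Bool.true_and]
          rw [if_pos (by simpa using hc)]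
          rw [if_neg (by simpa using hp)]
          simp [show ¬line.toList[n]?.getD ' ' = ' ' from by simpa using hc, add_sub_cancel_right]

-- ===== VERDICT (by name: the statement is the Claim_ definition above) =====
theorem header_fields_spec : Claim_equal_header_fields := by
  intro line _
  unfold Spec_header_fields header_fields header_fields_alt
  simp only [PySem.Str.len_eq]
  rw [pv_inv line line.toList.length]
  rfl
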